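-- pv_equiv track=rewrite | github.com/Kirito123l/Emission_Agenet_Ali | evaluation/merge_generated_cases.py | _count_by_dimension_and_difficulty
-- ===== SOURCE A (Python) =====
-- from typing import Any, Dict, List
--
-- def _count_by_dimension_and_difficulty(records: List[Dict[str, Any]]) -> Dict[str, Dict[str, int]]:
--     counts: Dict[str, Dict[str, int]] = {}
--     for record in records:
--         dimension = str(record.get("dimension", "unknown"))
--         difficulty = str(record.get("difficulty", "unknown"))
--         counts.setdefault(dimension, {})
--         counts[dimension][difficulty] = counts[dimension].get(difficulty, 0) + 1
--     return counts
-- ===== SOURCE B (Python) =====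
-- from typing import Any, Dict, List
--
-- def _count_by_dimension_and_difficulty(records: List[Dict[str, Any]]) -> Dict[str, Dict[str, int]]:
--     # Declarative rewrite: extract the (dimension, difficulty) pairs once, then
--     # build the nested result by comprehensions, counting occurrences directly.
--     pairs = [(str(r.get("dimension", "unknown")), str(r.get("difficulty", "unknown"))) for r in records]
--     return {d: {f: pairs.count((d, f)) for (d2, f) in pairs if d2 == d} for (d, _f) in pairs}
-- ===== Notes on version B (the rewrite author's own statement) =====
-- stated objective: alternative
-- what changed: Replaces the incremental nested-dict mutation (setdefault + per-record counter increment) by a declarative two-phase form: extract all (dimension, difficulty) pairs once, then build the nested dict with comprehensions whose counts come from pairs.count.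
import Mathlib
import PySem

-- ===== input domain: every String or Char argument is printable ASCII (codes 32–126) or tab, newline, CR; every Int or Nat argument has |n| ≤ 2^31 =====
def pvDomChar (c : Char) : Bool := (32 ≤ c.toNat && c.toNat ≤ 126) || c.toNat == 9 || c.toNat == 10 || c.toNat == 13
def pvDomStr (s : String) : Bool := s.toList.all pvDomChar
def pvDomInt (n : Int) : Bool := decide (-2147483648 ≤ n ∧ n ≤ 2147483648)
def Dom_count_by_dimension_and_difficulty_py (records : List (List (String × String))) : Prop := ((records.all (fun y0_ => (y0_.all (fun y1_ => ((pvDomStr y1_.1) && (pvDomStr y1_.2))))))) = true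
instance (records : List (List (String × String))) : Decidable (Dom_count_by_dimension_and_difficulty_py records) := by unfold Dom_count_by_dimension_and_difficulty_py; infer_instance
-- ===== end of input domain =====

-- B replaces A's incremental nested-dict mutation by a two-phase comprehension form
-- (extract the (dimension, difficulty) pairs, then count occurrences); objective: alternative.

-- shared helper: record.get(key, "unknown") — str() is the identity on the string values here
def pvGetStr (r : List (String × String)) (k : String) : String :=
  (PySem.Dict.mk r).getD k "unknown"

-- ===== PORT A =====
def count_by_dimension_and_difficulty_py (records : List (List (String × String))) : List (String × List (String × Int)) :=
  (records.foldl
    (fun (counts : PySem.Dict String (PySem.Dict String Int)) record =>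
      let dimension := pvGetStr record "dimension"
      let difficulty := pvGetStr record "difficulty"
      let counts := counts.setdefault dimension PySem.Dict.empty
      counts.insert dimension
        ((counts.getD dimension PySem.Dict.empty).insert difficulty
          ((counts.getD dimension PySem.Dict.empty).getD difficulty 0 + 1)))
    PySem.Dict.empty).items.map (fun kv => (kv.1, kv.2.items))

-- ===== PORT B =====
def count_by_dimension_and_difficulty_py_alt (records : List (List (String × String))) : List (String × List (String × Int)) :=
  let pairs := records.map (fun r => (pvGetStr r "dimension", pvGetStr r "difficulty"))
  (pairs.foldl
    (fun (out : PySem.Dict String (PySem.Dict String Int)) p =>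
      out.insert p.1
        ((pairs.filter (fun q => q.1 == p.1)).foldl
          (fun (m : PySem.Dict String Int) q => m.insert q.2 ((pairs.count (p.1, q.2) : Int)))
          PySem.Dict.empty))
    PySem.Dict.empty).items.map (fun kv => (kv.1, kv.2.items))

-- ===== PRECONDITION & SPEC =====
def Spec_count_by_dimension_and_difficulty_py (records : List (List (String × String))) (out : List (String × List (String × Int))) : Prop := out = count_by_dimension_and_difficulty_py_alt records
instance (records : List (List (String × String))) (out : List (String × List (String × Int))) : Decidable (Spec_count_by_dimension_and_difficulty_py records out) := by unfold Spec_count_by_dimension_and_difficulty_py; infer_instance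

-- ===== CLAIM (what is proved, stated in full; the proofs are below) =====
def Claim_equal_count_by_dimension_and_difficulty_py : Prop := ∀ (records : List (List (String × String))), Dom_count_by_dimension_and_difficulty_py records → Spec_count_by_dimension_and_difficulty_py records (count_by_dimension_and_difficulty_py records)

-- ===== LEMMAS AND PROOFS =====

-- A's loop step, after collapsing setdefault+assignment into a single insert
def pvStepN (c : PySem.Dict String (PySem.Dict String Int)) (x : String × String) :
    PySem.Dict String (PySem.Dict String Int) :=
  c.insert x.1 ((c.getD x.1 PySem.Dict.empty).insert x.2
    ((c.getD x.1 PySem.Dict.empty).getD x.2 0 + 1))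

lemma pvStepA_eq (c : PySem.Dict String (PySem.Dict String Int)) (d f : String) :
    (let c1 := c.setdefault d PySem.Dict.empty
     c1.insert d ((c1.getD d PySem.Dict.empty).insert f
       ((c1.getD d PySem.Dict.empty).getD f 0 + 1))) = pvStepN c (d, f) := by
  unfold pvStepN
  by_cases h : c.contains d = true
  · simp only [PySem.Dict.setdefault_of_contains c _ h]
  · simp only [PySem.Dict.setdefault_of_not_contains c _ (by simpa using h),
      PySem.Dict.getD_insert_self, PySem.Dict.insert_insert_self,
      PySem.Dict.getD_of_not_contains c _ (by simpa using h)]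

-- getD of A's fold: the inner dict at d is the counting fold over d's difficulties
lemma pvA_getD (p : List (String × String)) (c : PySem.Dict String (PySem.Dict String Int)) (d : String) :
    (p.foldl pvStepN c).getD d PySem.Dict.empty =
      ((p.filter (fun x => x.1 == d)).map (·.2)).foldl
        (fun m f => m.insert f (m.getD f 0 + 1)) (c.getD d PySem.Dict.empty) := by
  induction p generalizing c with
  | nil => rfl
  | cons a p ih =>
    simp only [List.foldl_cons, ih, List.filter_cons]
    by_cases h : a.1 = d
    · simp [pvStepN, h]
    · simp [pvStepN, PySem.Dict.getD_insert, h, Ne.symm h, beq_iff_eq]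

-- getD of an insert-by-key fold whose value is a function of the key: last write wins
lemma pvFoldKey_getD {ν : Type} (q : List String) (g : String → ν) (dflt : ν)
    (c : PySem.Dict String ν) (d : String) :
    (q.foldl (fun out k => out.insert k (g k)) c).getD d dflt =
      if d ∈ q then g d else c.getD d dflt := by
  induction q generalizing c with
  | nil => simp
  | cons a q ih =>
    simp only [List.foldl_cons, ih, List.mem_cons]
    by_cases h : d ∈ q
    · simp [h]
    · by_cases h2 : d = a
      · simp [h2]
      · simp [h, h2, PySem.Dict.getD_insert]

lemma pvCount_filter (p : List (String × String)) (d f : String) :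
    ((p.filter (fun q => q.1 == d)).map (·.2)).count f = p.count (d, f) := by
  induction p with
  | nil => rfl
  | cons a p ih =>
    by_cases h : a.1 = d
    · by_cases h2 : a.2 = f
      · simp [List.count_cons, h, h2, ih, Prod.ext_iff]
      · simp [h, h2, ih, Prod.ext_iff]
    · simp [h, ih, Prod.ext_iff]

lemma pvMain (records : List (List (String × String))) :
    count_by_dimension_and_difficulty_py records = count_by_dimension_and_difficulty_py_alt records := by
  unfold count_by_dimension_and_difficulty_py count_by_dimension_and_difficulty_py_alt
  have hfun : (fun (counts : PySem.Dict String (PySem.Dict String Int)) record =>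
        let dimension := pvGetStr record "dimension"
        let difficulty := pvGetStr record "difficulty"
        let counts := counts.setdefault dimension PySem.Dict.empty
        counts.insert dimension
          ((counts.getD dimension PySem.Dict.empty).insert difficulty
            ((counts.getD dimension PySem.Dict.empty).getD difficulty 0 + 1)))
      = (fun (c : PySem.Dict String (PySem.Dict String Int)) r =>
          pvStepN c (pvGetStr r "dimension", pvGetStr r "difficulty")) := by
    funext c r
    exact pvStepA_eq c (pvGetStr r "dimension") (pvGetStr r "difficulty")
  rw [hfun, show (fun (c : PySem.Dict String (PySem.Dict String Int)) r =>
          pvStepN c (pvGetStr r "dimension", pvGetStr r "difficulty"))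
        = (fun c r => pvStepN c ((fun r => (pvGetStr r "dimension", pvGetStr r "difficulty")) r)) from rfl,
      ← List.foldl_map (f := fun r => (pvGetStr r "dimension", pvGetStr r "difficulty")) (g := pvStepN)]
  dsimp only
  generalize (records.map (fun r => (pvGetStr r "dimension", pvGetStr r "difficulty"))) = pairs
  set g : String → PySem.Dict String Int := fun d =>
    (pairs.filter (fun q => q.1 == d)).foldl
      (fun (m : PySem.Dict String Int) q => m.insert q.2 ((pairs.count (d, q.2) : Int)))
      PySem.Dict.empty with hg
  have hB : pairs.foldl
      (fun (out : PySem.Dict String (PySem.Dict String Int)) p =>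
        out.insert p.1
          ((pairs.filter (fun q => q.1 == p.1)).foldl
            (fun (m : PySem.Dict String Int) q => m.insert q.2 ((pairs.count (p.1, q.2) : Int)))
            PySem.Dict.empty))
      PySem.Dict.empty
      = (pairs.map (·.1)).foldl (fun out k => out.insert k (g k)) PySem.Dict.empty := by
    rw [List.foldl_map]
  rw [hB]
  have hKA : (pairs.foldl pvStepN PySem.Dict.empty).keys
      = PySem.Set.ofList (pairs.map (·.1)) := by
    unfold pvStepN
    have := PySem.Dict.keys_foldl_insert_key pairs (fun x => x.1)
      (fun (c : PySem.Dict String (PySem.Dict String Int)) x => (c.getD x.1 PySem.Dict.empty).insert x.2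
        ((c.getD x.1 PySem.Dict.empty).getD x.2 0 + 1)) PySem.Dict.empty
    rw [PySem.Dict.keys_empty, PySem.Set.update_nil_left] at this
    exact this
  have hKB : ((pairs.map (·.1)).foldl (fun out k => out.insert k (g k)) PySem.Dict.empty).keys
      = PySem.Set.ofList (pairs.map (·.1)) := by
    have := PySem.Dict.keys_foldl_insert_key (pairs.map (·.1)) id
      (fun _ k => g k) PySem.Dict.empty
    simpa [PySem.Dict.keys_empty, PySem.Set.update_nil_left] using this
  have hnA : (pairs.foldl pvStepN PySem.Dict.empty).keys.Nodup := by
    unfold pvStepN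
    have := PySem.Dict.nodup_keys_foldl_insert_key pairs (fun x => x.1)
      (fun (c : PySem.Dict String (PySem.Dict String Int)) x => (c.getD x.1 PySem.Dict.empty).insert x.2
        ((c.getD x.1 PySem.Dict.empty).getD x.2 0 + 1)) PySem.Dict.empty
      (by simp [PySem.Dict.keys_empty])
    exact this
  have hnB : ((pairs.map (·.1)).foldl (fun out k => out.insert k (g k)) PySem.Dict.empty).keys.Nodup := by
    exact PySem.Dict.nodup_keys_foldl_insert_key (pairs.map (·.1)) id
      (fun _ k => g k) PySem.Dict.empty (by simp [PySem.Dict.keys_empty])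
  rw [PySem.Dict.items_eq_map_keys _ hnA PySem.Dict.empty,
      PySem.Dict.items_eq_map_keys _ hnB PySem.Dict.empty, hKA, hKB,
      List.map_map, List.map_map]
  apply List.map_congr_left
  intro d hd
  have hdmem : d ∈ pairs.map (·.1) := (PySem.Set.mem_ofList _ _).mp hd
  simp only [Function.comp]
  rw [pvA_getD, pvFoldKey_getD, if_pos hdmem]
  simp only [PySem.Dict.getD_empty]
  refine congrArg _ (congrArg _ ?_)
  set fs := (pairs.filter (fun q => q.1 == d)).map (·.2) with hfs
  have hBinner : g d = fs.foldl (fun (m : PySem.Dict String Int) f => m.insert f ((pairs.count (d, f) : Int))) PySem.Dict.empty := by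
    rw [hg, hfs, List.foldl_map]
  rw [hBinner]
  apply PySem.Dict.ext
  have hkA : (fs.foldl (fun (m : PySem.Dict String Int) f => m.insert f (m.getD f 0 + 1)) PySem.Dict.empty).keys
      = PySem.Set.ofList fs := by
    have := PySem.Dict.keys_foldl_insert_key fs id
      (fun (m : PySem.Dict String Int) f => m.getD f 0 + 1) PySem.Dict.empty
    simpa [PySem.Dict.keys_empty, PySem.Set.update_nil_left] using this
  have hkB : (fs.foldl (fun (m : PySem.Dict String Int) f => m.insert f ((pairs.count (d, f) : Int))) PySem.Dict.empty).keys
      = PySem.Set.ofList fs := by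
    have := PySem.Dict.keys_foldl_insert_key fs id
      (fun _ f => ((pairs.count (d, f) : Int))) PySem.Dict.empty
    simpa [PySem.Dict.keys_empty, PySem.Set.update_nil_left] using this
  have hnA2 : (fs.foldl (fun (m : PySem.Dict String Int) f => m.insert f (m.getD f 0 + 1)) PySem.Dict.empty).keys.Nodup :=
    PySem.Dict.nodup_keys_foldl_insert_key fs id _ PySem.Dict.empty (by simp [PySem.Dict.keys_empty])
  have hnB2 : (fs.foldl (fun (m : PySem.Dict String Int) f => m.insert f ((pairs.count (d, f) : Int))) PySem.Dict.empty).keys.Nodup :=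
    PySem.Dict.nodup_keys_foldl_insert_key fs id _ PySem.Dict.empty (by simp [PySem.Dict.keys_empty])
  have hIA := PySem.Dict.items_eq_map_keys _ hnA2 0
  have hIB := PySem.Dict.items_eq_map_keys _ hnB2 0
  rw [hIA, hIB, hkA, hkB]
  apply List.map_congr_left
  intro f hf
  have hfmem : f ∈ fs := (PySem.Set.mem_ofList _ _).mp hf
  refine congrArg _ ?_
  rw [PySem.Dict.getD_foldl_insert_add_one, pvFoldKey_getD, if_pos hfmem,
      PySem.Dict.getD_empty, ← pvCount_filter pairs d f, ← hfs]
  simp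

-- ===== VERDICT (by name: the statement is the Claim_ definition above) =====
theorem count_by_dimension_and_difficulty_py_spec : Claim_equal_count_by_dimension_and_difficulty_py := by
  intro records _
  unfold Spec_count_by_dimension_and_difficulty_py
  exact pvMain records
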